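-- pv_equiv track=rewrite | github.com/Pawo0/WDI | kolosy/zad1.2017.2018.gr2.py | czy_sum_z_fib
-- ===== SOURCE A (Python) =====
-- def czy_sum_z_fib(n):
--     x = 1
--     y = 1
--     sum = 0
--     while sum < n:
--         sum += x
--         x, y = y, x+y
--     x, y = 1, 1
--     while sum > n:
--         sum -= x
--         x, y = y, x+y
--     return sum == n
-- ===== SOURCE B (Python) =====
-- def _extend(P, a, b, limit):
--     # append Fibonacci prefix sums to P until its last value reaches limit
--     while P[-1] < limit:
--         P.append(P[-1] + a)
--         a, b = b, a + b
--     return P, a, b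
--
-- def czy_sum_z_fib(n):
--     P, a, b = _extend([0], 1, 1, n)
--     target = P[-1] - n
--     P, a, b = _extend(P, a, b, target)
--     return target in P
-- ===== Notes on version B (the rewrite author's own statement) =====
-- stated objective: alternative
-- what changed: Replaces A's second on-the-fly Fibonacci subtraction loop with a precomputed Fibonacci prefix-sum table extended once, reducing the check to a membership test of S-n in that table.
import Mathlib
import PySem

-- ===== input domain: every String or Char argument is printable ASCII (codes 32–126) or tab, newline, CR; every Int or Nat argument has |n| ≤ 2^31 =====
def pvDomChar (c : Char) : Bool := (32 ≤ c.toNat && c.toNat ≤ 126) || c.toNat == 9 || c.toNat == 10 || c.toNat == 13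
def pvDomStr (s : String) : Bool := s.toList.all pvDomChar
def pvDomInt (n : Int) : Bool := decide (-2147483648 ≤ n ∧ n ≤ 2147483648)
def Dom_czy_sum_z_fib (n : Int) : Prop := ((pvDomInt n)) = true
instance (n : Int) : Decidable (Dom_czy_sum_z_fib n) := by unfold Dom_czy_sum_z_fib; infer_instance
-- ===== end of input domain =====

-- B replaces A's two on-the-fly Fibonacci subtraction/addition loops by one precomputed
-- prefix-sum table plus a membership test (objective: alternative, same cost).

-- ===== PORT A =====
-- A's two while loops; the '1 ≤ x' conjunct only makes the recursion total
-- (x starts at 1 and is a Fibonacci number ≥ 1 on every actual call).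
def pvALoop1 (n sum x y : Int) : Int :=
  if _h : sum < n ∧ 1 ≤ x then pvALoop1 n (sum + x) y (x + y) else sum
termination_by (n - sum).toNat
decreasing_by omega

def pvALoop2 (n sum x y : Int) : Int :=
  if _h : n < sum ∧ 1 ≤ x then pvALoop2 n (sum - x) y (x + y) else sum
termination_by (sum - n).toNat
decreasing_by omega

def czy_sum_z_fib (n : Int) : Bool :=
  let s := pvALoop1 n 0 1 1
  pvALoop2 n s 1 1 == n

-- ===== PORT B =====
-- Source B's helper _extend; the '1 ≤ a' conjunct only makes the recursion total
-- (a starts at 1 and is a Fibonacci number ≥ 1 on every actual call).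
def pvExtend (limit : Int) (P : List Int) (a b : Int) : List Int × Int × Int :=
  if _h : P.getLastD 0 < limit ∧ 1 ≤ a then
    pvExtend limit (P ++ [P.getLastD 0 + a]) b (a + b)
  else (P, a, b)
termination_by (limit - P.getLastD 0).toNat
decreasing_by
  have e : (P ++ [P.getLastD 0 + a]).getLastD 0 = P.getLastD 0 + a := by simp
  rw [e]; omega

def czy_sum_z_fib_alt (n : Int) : Bool :=
  let r1 := pvExtend n [0] 1 1
  let target := r1.1.getLastD 0 - n
  let r2 := pvExtend target r1.1 r1.2.1 r1.2.2
  r2.1.contains target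

-- ===== PRECONDITION & SPEC =====
def Spec_czy_sum_z_fib (n : Int) (out : Bool) : Prop := out = czy_sum_z_fib_alt n
instance (n : Int) (out : Bool) : Decidable (Spec_czy_sum_z_fib n out) := by unfold Spec_czy_sum_z_fib; infer_instance

-- ===== CLAIM (what is proved, stated in full; the proofs are below) =====
def Claim_equal_czy_sum_z_fib : Prop := ∀ (n : Int), Dom_czy_sum_z_fib n → Spec_czy_sum_z_fib n (czy_sum_z_fib n)

-- ===== LEMMAS AND PROOFS =====

-- Fibonacci numbers 1,1,2,3,5,… and their prefix sums F 0 = 0, F (k+1) = F k + fib k.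
def pvFib : Nat → Int
  | 0 => 1
  | 1 => 1
  | (k+2) => pvFib k + pvFib (k+1)

def pvF : Nat → Int
  | 0 => 0
  | (k+1) => pvF k + pvFib k

theorem pvFib_pos : ∀ k, 1 ≤ pvFib k ∧ 1 ≤ pvFib (k+1) := by
  intro k
  induction k with
  | zero => simp [pvFib]
  | succ k ih =>
    refine ⟨ih.2, ?_⟩
    show 1 ≤ pvFib k + pvFib (k+1)
    omega

theorem pvF_lt_succ (k : Nat) : pvF k < pvF (k+1) := by
  have := pvFib_pos k
  show pvF k < pvF k + pvFib k
  omega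

theorem pvF_mono {j k : Nat} (h : j ≤ k) : pvF j ≤ pvF k := by
  induction h with
  | refl => exact le_refl _
  | step _ ih => exact le_trans ih (le_of_lt (pvF_lt_succ _))

-- smallest index m ≥ k with n ≤ pvF m
def pvIdx (n : Int) (k : Nat) : Nat :=
  if pvF k < n then pvIdx n (k+1) else k
termination_by (n - pvF k).toNat
decreasing_by have := pvF_lt_succ k; omega

theorem pvIdx_ge (n : Int) (k : Nat) : k ≤ pvIdx n k ∧ n ≤ pvF (pvIdx n k) := by
  unfold pvIdx
  split
  · have := pvIdx_ge n (k+1); omega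
  · omega
termination_by (n - pvF k).toNat
decreasing_by have := pvF_lt_succ k; omega

theorem pvIdx_min (n : Int) (k : Nat) : ∀ m, k ≤ m → n ≤ pvF m → pvIdx n k ≤ m := by
  intro m hk hm
  unfold pvIdx
  split
  · rename_i h
    have hne : k ≠ m := by rintro rfl; omega
    exact pvIdx_min n (k+1) m (by omega) hm
  · exact hk
termination_by (n - pvF k).toNat
decreasing_by have := pvF_lt_succ k; omega

theorem pvALoop1_eq (n : Int) (k : Nat) :
    pvALoop1 n (pvF k) (pvFib k) (pvFib (k+1)) = pvF (pvIdx n k) := by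
  unfold pvALoop1 pvIdx
  have h1 := (pvFib_pos k).1
  split
  · rename_i h
    have e1 : pvF k + pvFib k = pvF (k+1) := rfl
    have e2 : pvFib k + pvFib (k+1) = pvFib (k+2) := rfl
    rw [e1, e2, pvALoop1_eq n (k+1)]
    rw [if_pos (by omega)]
  · rename_i h
    rw [if_neg (by omega)]
termination_by (n - pvF k).toNat
decreasing_by have := pvF_lt_succ k; omega

theorem pvALoop2_eq (n S : Int) (k : Nat) :
    pvALoop2 n (S - pvF k) (pvFib k) (pvFib (k+1)) = S - pvF (pvIdx (S - n) k) := by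
  unfold pvALoop2 pvIdx
  have h1 := (pvFib_pos k).1
  split
  · rename_i h
    have e1 : S - pvF k - pvFib k = S - pvF (k+1) := by
      have : pvF (k+1) = pvF k + pvFib k := rfl
      omega
    have e2 : pvFib k + pvFib (k+1) = pvFib (k+2) := rfl
    rw [e1, e2, pvALoop2_eq n S (k+1)]
    rw [if_pos (by omega)]
  · rename_i h
    rw [if_neg (by omega)]
termination_by (S - pvF k - n).toNat
decreasing_by have := pvF_lt_succ k; omega

-- the prefix-sum table of length k+1
def pvTab (k : Nat) : List Int := (List.range (k+1)).map pvF

theorem pvTab_last (k : Nat) : (pvTab k).getLastD 0 = pvF k := by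
  simp [pvTab, List.range_succ]

theorem pvTab_concat (k : Nat) : pvTab k ++ [pvF k + pvFib k] = pvTab (k+1) := by
  have : pvF k + pvFib k = pvF (k+1) := rfl
  simp [pvTab, this, List.range_succ]

theorem pvExtend_eq (limit : Int) (k : Nat) :
    pvExtend limit (pvTab k) (pvFib k) (pvFib (k+1)) =
      (pvTab (pvIdx limit k), pvFib (pvIdx limit k), pvFib (pvIdx limit k + 1)) := by
  rw [pvExtend.eq_def]
  unfold pvIdx
  have h1 := (pvFib_pos k).1
  rw [pvTab_last]
  split
  · rename_i h
    have e2 : pvFib k + pvFib (k+1) = pvFib (k+2) := rfl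
    rw [pvTab_concat, e2, pvExtend_eq limit (k+1)]
    rw [if_pos (by omega)]
  · rename_i h
    rw [if_neg (by omega)]
termination_by (limit - pvF k).toNat
decreasing_by have := pvF_lt_succ k; omega

theorem pvTab_mem (k : Nat) (t : Int) : t ∈ pvTab k ↔ ∃ j, j ≤ k ∧ pvF j = t := by
  simp [pvTab]

-- ===== VERDICT =====
theorem czy_sum_z_fib_spec : Claim_equal_czy_sum_z_fib := by
  intro n _
  show czy_sum_z_fib n = czy_sum_z_fib_alt n
  have tab0 : ([0] : List Int) = pvTab 0 := by simp [pvTab, pvF]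
  -- evaluate A
  set K := pvIdx n 0 with hK
  have hA1 : pvALoop1 n 0 1 1 = pvF K := by
    have h := pvALoop1_eq n 0
    rw [show pvF 0 = (0 : Int) from rfl] at h
    exact h
  set target := pvF K - n with htarget
  set J := pvIdx target 0 with hJ
  have hA2 : pvALoop2 n (pvF K) 1 1 = pvF K - pvF J := by
    have h := pvALoop2_eq n (pvF K) 0
    rw [show pvF 0 = 0 from rfl, sub_zero] at h
    exact h
  -- evaluate B
  set M := pvIdx target K with hM
  have hB1 : pvExtend n [0] 1 1 = (pvTab K, pvFib K, pvFib (K+1)) := by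
    rw [tab0]; exact pvExtend_eq n 0
  have hB2 : pvExtend target (pvTab K) (pvFib K) (pvFib (K+1)) =
      (pvTab M, pvFib M, pvFib (M+1)) := pvExtend_eq target K
  have hBval : czy_sum_z_fib_alt n = (pvTab M).contains target := by
    simp only [czy_sum_z_fib_alt, hB1, pvTab_last, ← htarget, hB2]
  have hAval : czy_sum_z_fib n = ((pvF K - pvF J) == n) := by
    simp only [czy_sum_z_fib, hA1, hA2]
  -- key facts about the indices
  have hKn : n ≤ pvF K := (pvIdx_ge n 0).2
  have hJt : target ≤ pvF J := (pvIdx_ge target 0).2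
  have hMt : target ≤ pvF M := (pvIdx_ge target K).2
  have key : (pvF J = target) ↔ target ∈ pvTab M := by
    constructor
    · intro h
      have hJM : J ≤ M := pvIdx_min target 0 M (Nat.zero_le M) hMt
      exact (pvTab_mem M target).mpr ⟨J, hJM, h⟩
    · intro h
      obtain ⟨j, hjM, hjt⟩ := (pvTab_mem M target).mp h
      have hJj : J ≤ j := pvIdx_min target 0 j (Nat.zero_le j) (le_of_eq hjt.symm)
      have := pvF_mono hJj
      omega
  rw [hAval, hBval, Bool.eq_iff_iff]
  simp only [beq_iff_eq, List.contains_eq_mem, decide_eq_true_eq]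
  constructor
  · intro h; exact key.mp (by omega)
  · intro h; have := key.mpr h; omega
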